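-- pv_equiv track=rewrite | github.com/syurskyi/Algorithms_and_Data_Structure | _algorithms_challenges/projecteuler/ProjectEuler-master(2)/ProjectEuler-master/225.py | has_divisor
-- ===== SOURCE A (Python) =====
-- def has_divisor(d):
--     remainder_hash = set()
--     T = (1, 1, 1)
--     while True:
--         T = (T[1], T[2], (T[0] + T[1] + T[2]) % d)
--         if T[2] is 0:
--             return True
--         hash_value = T[0]*d*d + T[1]*d + T[2]
--         if hash_value in remainder_hash:
--             return False
--         else:
--             remainder_hash.add(hash_value)
-- ===== SOURCE B (Python) =====
-- def has_divisor(d):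
--     # Floyd cycle detection over the tribonacci-mod-d state sequence, then one
--     # lap around the detected cycle; O(1) memory instead of A's visited set.
--     def step(t):
--         return (t[1], t[2], (t[0] + t[1] + t[2]) % d)
--
--     slow = fast = (1, 1, 1)
--     while True:
--         slow = step(slow)
--         if slow[2] == 0:
--             return True
--         fast = step(step(fast))
--         if slow == fast:
--             break
--     # slow is on the cycle; scan one full lap for a zero residue
--     cur = step(slow)
--     while cur != slow:
--         if cur[2] == 0:
--             return True
--         cur = step(cur)
--     return False
-- ===== Notes on version B (the rewrite author's own statement) =====
-- stated objective: alternative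
-- what changed: Replaces A's growing visited-set of hashed states with Floyd tortoise/hare cycle detection followed by one lap around the detected cycle, using O(1) memory instead of O(period) and no hashing; Pre_ excludes only d = 0, where A raises ZeroDivisionError.
-- outside the precondition, e.g. on has_divisor(0): A raises ZeroDivisionError, B raises ZeroDivisionError
import Mathlib
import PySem

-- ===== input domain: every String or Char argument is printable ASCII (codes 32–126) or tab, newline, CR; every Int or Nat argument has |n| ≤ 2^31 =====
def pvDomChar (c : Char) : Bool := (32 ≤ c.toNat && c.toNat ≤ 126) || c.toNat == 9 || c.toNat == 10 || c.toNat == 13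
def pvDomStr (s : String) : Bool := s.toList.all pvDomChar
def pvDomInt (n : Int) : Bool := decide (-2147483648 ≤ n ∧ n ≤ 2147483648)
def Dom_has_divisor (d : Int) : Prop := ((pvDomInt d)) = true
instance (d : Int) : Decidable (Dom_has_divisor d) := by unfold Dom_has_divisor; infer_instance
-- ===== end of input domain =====

-- B replaces A's visited-set of hashed states by Floyd cycle detection plus one lap
-- around the detected cycle (O(1) memory, no hashing); return values proved equal for d ≠ 0.

-- ===== PORT A =====
-- hash_value = T[0]*d*d + T[1]*d + T[2]
def pvHash (d : Int) (T : Int × Int × Int) : Int := T.1 * d * d + T.2.1 * d + T.2.2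

-- the 'while True' loop of A; fuel (|d|^3 + 4) is a termination guard only and is
-- proved never to run out for d ≠ 0 (the visited hashes are distinct states mod d)
def pvLoopA (d : Int) : Nat → Std.HashSet Int → (Int × Int × Int) → Bool
  | 0, _, _ => false
  | f+1, visited, T =>
    let T' : Int × Int × Int := (T.2.1, T.2.2, PySem.Int.mod (T.1 + T.2.1 + T.2.2) d)
    if T'.2.2 = 0 then true
    else
      let h := pvHash d T'
      if visited.contains h then false
      else pvLoopA d f (visited.insert h) T'

def has_divisor (d : Int) : Bool :=
  pvLoopA d (d.natAbs ^ 3 + 4) (∅ : Std.HashSet Int) (1, 1, 1)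

-- ===== PORT B =====
-- def step(t): return (t[1], t[2], (t[0]+t[1]+t[2]) % d)
def altStep (d : Int) (t : Int × Int × Int) : Int × Int × Int :=
  (t.2.1, t.2.2, PySem.Int.mod (t.1 + t.2.1 + t.2.2) d)

-- the closing lap: cur = step(slow); while cur != slow: zero-check; cur = step(cur)
def altScan (d : Int) : Nat → (Int × Int × Int) → (Int × Int × Int) → Bool
  | 0, _, _ => false
  | f+1, cur, slow =>
    if cur = slow then false
    else if cur.2.2 = 0 then true
    else altScan d f (altStep d cur) slow

-- Floyd phase: advance slow by one, fast by two, zero-check slow, break on meet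
def altMeet (d : Int) : Nat → (Int × Int × Int) → (Int × Int × Int) → Bool
  | 0, _, _ => false
  | f+1, slow, fast =>
    let slow' := altStep d slow
    if slow'.2.2 = 0 then true
    else
      let fast' := altStep d (altStep d fast)
      if slow' = fast' then altScan d (d.natAbs ^ 3 + 4) (altStep d slow') slow'
      else altMeet d f slow' fast'

def has_divisor_alt (d : Int) : Bool :=
  altMeet d (d.natAbs ^ 3 + 4) (1, 1, 1) (1, 1, 1)

-- ===== PRECONDITION & SPEC =====
-- A raises ZeroDivisionError exactly when d = 0 (the '% d' of the first iteration)
def Pre_has_divisor (d : Int) : Prop := d ≠ 0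
instance (d : Int) : Decidable (Pre_has_divisor d) := by unfold Pre_has_divisor; infer_instance

def pvWitness_has_divisor : Int := 2

def Spec_has_divisor (d : Int) (out : Bool) : Prop := out = has_divisor_alt d
instance (d : Int) (out : Bool) : Decidable (Spec_has_divisor d out) := by unfold Spec_has_divisor; infer_instance

-- ===== CLAIM (what is proved, stated in full; the proofs are below) =====
def Claim_equal_has_divisor : Prop :=
  ∀ (d : Int), Dom_has_divisor d → Pre_has_divisor d → Spec_has_divisor d (has_divisor d)

-- ===== LEMMAS AND PROOFS =====

-- the tribonacci-mod-d state sequence both programs walk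
def pvSeq (d : Int) : Nat → Int × Int × Int
  | 0 => (1, 1, 1)
  | k+1 => altStep d (pvSeq d k)

-- "some state with third component 0 is ever reached"
def pvZS (d : Int) : Prop := ∃ j : Nat, 1 ≤ j ∧ (pvSeq d j).2.2 = 0

-- the residues of Python's % d
noncomputable def pvR (d : Int) : Finset Int := if 0 < d then Finset.Icc 0 (d-1) else Finset.Icc (d+1) 0

theorem mem_pvR_mod (d x : Int) (hd : d ≠ 0) : PySem.Int.mod x d ∈ pvR d := by
  unfold pvR
  rcases lt_trichotomy d 0 with h | h | h
  · have hb := PySem.Int.mod_neg_bounds (a := x) h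
    simp only [if_neg (by omega : ¬ 0 < d), Finset.mem_Icc]
    omega
  · exact absurd h hd
  · have h1 := PySem.Int.mod_nonneg (a := x) h
    have h2 := PySem.Int.mod_lt (a := x) h
    simp only [if_pos h, Finset.mem_Icc]
    omega

theorem card_pvR (d : Int) (hd : d ≠ 0) : (pvR d).card = d.natAbs := by
  unfold pvR
  rcases lt_trichotomy d 0 with h | h | h
  · rw [if_neg (by omega : ¬ 0 < d), Int.card_Icc]
    omega
  · exact absurd h hd
  · rw [if_pos h, Int.card_Icc]
    omega

theorem pvSeq_b (d : Int) (k : Nat) : (pvSeq d (k+1)).2.1 = (pvSeq d k).2.2 := rfl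

theorem pvSeq_a (d : Int) (k : Nat) : (pvSeq d (k+1)).1 = (pvSeq d k).2.1 := rfl

theorem pvSeq_c_mem (d : Int) (hd : d ≠ 0) (k : Nat) (hk : 1 ≤ k) :
    (pvSeq d k).2.2 ∈ pvR d := by
  obtain ⟨j, rfl⟩ : ∃ j, k = j + 1 := ⟨k - 1, by omega⟩
  exact mem_pvR_mod d _ hd

theorem pvSeq_mem_RT (d : Int) (hd : d ≠ 0) (k : Nat) (hk : 3 ≤ k) :
    pvSeq d k ∈ (pvR d) ×ˢ ((pvR d) ×ˢ (pvR d)) := by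
  obtain ⟨j, rfl⟩ : ∃ j, k = j + 3 := ⟨k - 3, by omega⟩
  simp only [Finset.mem_product]
  refine ⟨?_, ?_, ?_⟩
  · show (pvSeq d (j+1)).2.2 ∈ pvR d
    exact pvSeq_c_mem d hd _ (by omega)
  · show (pvSeq d (j+2)).2.2 ∈ pvR d
    exact pvSeq_c_mem d hd _ (by omega)
  · exact pvSeq_c_mem d hd _ (by omega)

-- periodicity: a repeat propagates forward
theorem pv_per (d : Int) (i p : Nat) (h : pvSeq d i = pvSeq d (i+p)) :
    ∀ n, pvSeq d (i+n) = pvSeq d (i+n+p) := by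
  intro n
  induction n with
  | zero => simpa using h
  | succ n ih =>
      have : pvSeq d (i + n + 1) = pvSeq d (i + n + p + 1) := congrArg (altStep d) ih
      calc pvSeq d (i + (n+1)) = pvSeq d (i + n + 1) := by ring_nf
        _ = pvSeq d (i + n + p + 1) := this
        _ = pvSeq d (i + (n+1) + p) := by ring_nf

theorem pv_per_ge (d : Int) (i p j : Nat) (h : pvSeq d i = pvSeq d (i+p)) (hj : i ≤ j) :
    pvSeq d j = pvSeq d (j+p) := by
  obtain ⟨n, rfl⟩ := Nat.exists_eq_add_of_le hj
  exact pv_per d i p h n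

theorem pv_per_mult (d : Int) (i p j : Nat) (h : pvSeq d i = pvSeq d (i+p)) (hj : i ≤ j) :
    ∀ c, pvSeq d j = pvSeq d (j + c*p) := by
  intro c
  induction c with
  | zero => simp
  | succ c ih =>
      calc pvSeq d j = pvSeq d (j + c * p) := ih
        _ = pvSeq d (j + c * p + p) := pv_per_ge d i p _ h (by omega)
        _ = pvSeq d (j + (c+1) * p) := by ring_nf

-- every later state folds back into the window [i, i+p)
theorem pv_fold (d : Int) (i p : Nat) (h : pvSeq d i = pvSeq d (i+p)) (hp : 1 ≤ p) :
    ∀ j, i ≤ j → ∃ j', i ≤ j' ∧ j' < i + p ∧ pvSeq d j' = pvSeq d j := by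
  intro j
  induction j using Nat.strong_induction_on with
  | _ j ih =>
    intro hij
    by_cases hlt : j < i + p
    · exact ⟨j, hij, hlt, rfl⟩
    · have h1 : i ≤ j - p := by omega
      obtain ⟨j', hj'1, hj'2, hj'3⟩ := ih (j - p) (by omega) h1
      refine ⟨j', hj'1, hj'2, ?_⟩
      rw [hj'3]
      have := pv_per_ge d i p (j - p) h h1
      rw [this]
      congr 1
      omega

theorem pv_no_zero (d : Int) (i p : Nat) (h : pvSeq d i = pvSeq d (i+p)) (hp : 1 ≤ p)
    (hi : 1 ≤ i) (hz : ∀ j, 1 ≤ j → j < i + p → (pvSeq d j).2.2 ≠ 0) : ¬ pvZS d := by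
  rintro ⟨j, hj1, hj0⟩
  by_cases hlt : j < i + p
  · exact hz j hj1 hlt hj0
  · obtain ⟨j', hj'1, hj'2, hj'3⟩ := pv_fold d i p h hp j (by omega)
    exact hz j' (by omega) hj'2 (by rw [hj'3]; exact hj0)

-- pigeonhole: a repeat occurs within the first |d|^3 + 3 states
theorem pv_pigeon (d : Int) (hd : d ≠ 0) :
    ∃ i p, 3 ≤ i ∧ 1 ≤ p ∧ i + p ≤ d.natAbs ^ 3 + 3 ∧ pvSeq d i = pvSeq d (i+p) := by
  classical
  set N := d.natAbs ^ 3 with hN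
  have hmaps : ∀ k ∈ Finset.Icc 3 (N + 3), pvSeq d k ∈ (pvR d) ×ˢ ((pvR d) ×ˢ (pvR d)) := by
    intro k hk
    rw [Finset.mem_Icc] at hk
    exact pvSeq_mem_RT d hd k hk.1
  have hcard : ((pvR d) ×ˢ ((pvR d) ×ˢ (pvR d))).card < (Finset.Icc 3 (N + 3)).card := by
    rw [Finset.card_product, Finset.card_product, card_pvR d hd, Nat.card_Icc]
    have hpow : N = d.natAbs * (d.natAbs * d.natAbs) := by rw [hN]; ring
    omega
  obtain ⟨a, ha, b, hb, hab, heq⟩ :=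
    Finset.exists_ne_map_eq_of_card_lt_of_maps_to hcard hmaps
  rw [Finset.mem_Icc] at ha hb
  rcases Nat.lt_or_ge a b with hlt | hge
  · exact ⟨a, b - a, by omega, by omega, by omega, by rw [heq]; congr 1; omega⟩
  · have hlt : b < a := by omega
    exact ⟨b, a - b, by omega, by omega, by omega, by rw [← heq]; congr 1; omega⟩

-- Floyd meeting point exists within the first |d|^3 + 3 steps
theorem pv_meet_exists (d : Int) (hd : d ≠ 0) :
    ∃ m, 1 ≤ m ∧ m ≤ d.natAbs ^ 3 + 3 ∧ pvSeq d m = pvSeq d (2*m) := by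
  obtain ⟨i, p, hi3, hp1, hb, hrep⟩ := pv_pigeon d hd
  set c := i / p + 1 with hc
  set m := c * p with hm
  have hcp : m = p * (i / p) + p := by rw [hm, hc]; ring
  have hdm := Nat.div_add_mod i p
  have hmod := Nat.mod_lt i (by omega : 0 < p)
  have hmi : i ≤ m := by omega
  have hmip : m ≤ i + p := by omega
  refine ⟨m, by omega, by omega, ?_⟩
  have h2 := pv_per_mult d i p m hrep hmi c
  rw [h2]
  congr 1
  omega

theorem pv_hash_inj (d a b c a' b' c' : Int) (hd : d ≠ 0)
    (hb : b ∈ pvR d) (hc : c ∈ pvR d) (hb' : b' ∈ pvR d) (hc' : c' ∈ pvR d)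
    (he : a * d * d + b * d + c = a' * d * d + b' * d + c') :
    a = a' ∧ b = b' ∧ c = c' := by
  have hb1 := hb; have hc1 := hc; have hb'1 := hb'; have hc'1 := hc'
  unfold pvR at hb1 hc1 hb'1 hc'1
  have hbounds : (d < 0 → (d < b ∧ b ≤ 0) ∧ (d < c ∧ c ≤ 0) ∧ (d < b' ∧ b' ≤ 0) ∧ (d < c' ∧ c' ≤ 0)) ∧
      (0 < d → (0 ≤ b ∧ b < d) ∧ (0 ≤ c ∧ c < d) ∧ (0 ≤ b' ∧ b' < d) ∧ (0 ≤ c' ∧ c' < d)) := by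
    constructor
    · intro hdneg
      rw [if_neg (by omega), Finset.mem_Icc] at hb1 hc1 hb'1 hc'1
      omega
    · intro hdpos
      rw [if_pos hdpos, Finset.mem_Icc] at hb1 hc1 hb'1 hc'1
      omega
  have habs : |c - c'| < |d| ∧ |b - b'| < |d| := by
    rcases lt_trichotomy d 0 with h | h | h
    · have := hbounds.1 h
      rw [abs_of_neg h, abs_lt, abs_lt]
      omega
    · exact absurd h hd
    · have := hbounds.2 h
      rw [abs_of_pos h, abs_lt, abs_lt]
      omega
  have hcc : c = c' := by
    have hdvd : |d| ∣ c - c' := by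
      rw [abs_dvd]
      exact ⟨(a' - a) * d + (b' - b), by linarith [he]⟩
    have := Int.eq_zero_of_abs_lt_dvd hdvd habs.1
    omega
  have hstep : ((a - a') * d + (b - b')) * d = 0 := by
    have : c - c' = 0 := by omega
    nlinarith [he]
  have hstep2 : (a - a') * d + (b - b') = 0 := by
    rcases mul_eq_zero.1 hstep with h | h
    · exact h
    · exact absurd h hd
  have hbb : b = b' := by
    have hdvd : |d| ∣ b - b' := by
      rw [abs_dvd]
      exact ⟨a' - a, by linarith [hstep2]⟩
    have := Int.eq_zero_of_abs_lt_dvd hdvd habs.2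
    omega
  have haa : a = a' := by
    have h1 : (a - a') * d = 0 := by omega
    rcases mul_eq_zero.1 h1 with h | h
    · omega
    · exact absurd h hd
  exact ⟨haa, hbb, hcc⟩

-- a hash repeat really is a state repeat, as long as no zero residue has appeared
theorem pv_dup_eq (d : Int) (k i : Nat) (hd : d ≠ 0) (h1 : 1 ≤ i) (hik : i ≤ k)
    (hz : ∀ j, 1 ≤ j → j ≤ k + 1 → (pvSeq d j).2.2 ≠ 0)
    (hh : pvHash d (pvSeq d (k+1)) = pvHash d (pvSeq d i)) :
    pvSeq d (k+1) = pvSeq d i := by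
  have hbmem : (pvSeq d (k+1)).2.1 ∈ pvR d := by
    rw [pvSeq_b]; exact pvSeq_c_mem d hd k (by omega)
  have hcmem : (pvSeq d (k+1)).2.2 ∈ pvR d := pvSeq_c_mem d hd (k+1) (by omega)
  unfold pvHash at hh
  rcases Nat.lt_or_ge i 2 with hi2 | hi2
  · -- i = 1
    have hi1 : i = 1 := by omega
    subst hi1
    have h1eq : pvSeq d 1 = (1, 1, PySem.Int.mod 3 d) := rfl
    rcases lt_trichotomy d 0 with hdneg | hd0 | hdpos
    · rcases Nat.lt_or_ge 1 (-d).toNat with hm2 | hm2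
      · -- d ≤ -2 : manual analysis
        have hd2 : d ≤ -2 := by omega
        exfalso
        set a := (pvSeq d (k+1)).1 with ha
        set b := (pvSeq d (k+1)).2.1 with hb
        set c := (pvSeq d (k+1)).2.2 with hc
        set z := PySem.Int.mod 3 d with hzdef
        have hzR : z ∈ pvR d := mem_pvR_mod d 3 hd
        rw [h1eq] at hh
        simp only at hh
        -- residue bounds (d < 0)
        unfold pvR at hbmem hcmem hzR
        rw [if_neg (by omega), Finset.mem_Icc] at hbmem hcmem hzR
        -- c = z
        have hcz : c = z := by
          have hdvd : |d| ∣ c - z := by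
            rw [abs_dvd]
            exact ⟨(1 - a) * d + (1 - b), by linarith [hh]⟩
          have habs : |c - z| < |d| := by
            rw [abs_of_neg hdneg, abs_lt]; omega
          have := Int.eq_zero_of_abs_lt_dvd hdvd habs
          omega
        have hstep : ((a - 1) * d + (b - 1)) * d = 0 := by nlinarith [hh, hcz]
        have hstep2 : (a - 1) * d + (b - 1) = 0 := by
          rcases mul_eq_zero.1 hstep with h | h
          · exact h
          · exact absurd h hd
        set t := 1 - a with ht
        have hbt : b = 1 + t * d := by rw [ht]; linarith [hstep2]
        have ha0 : a = 0 := by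
          rcases lt_trichotomy t 1 with htlt | hteq | htgt
          · exfalso
            have ht0 : t ≤ 0 := by omega
            have : 0 ≤ t * d := by nlinarith
            omega
          · omega
          · exfalso
            have h2t : (2:Int) ≤ t := by omega
            have : t * d ≤ 2 * d := by nlinarith
            omega
        -- a is an earlier residue, hence nonzero
        have ha1 : (pvSeq d (k+1)).1 = (pvSeq d k).2.1 := pvSeq_a d k
        rcases Nat.lt_or_ge k 2 with hk2 | hk2
        · have hk1 : k = 1 := by omega
          subst hk1
          have hone : a = 1 := by rw [ha, ha1]; rfl
          omega
        · obtain ⟨k', rfl⟩ : ∃ k', k = k' + 1 := ⟨k - 1, by omega⟩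
          have h2 : (pvSeq d (k'+1)).2.1 = (pvSeq d k').2.2 := pvSeq_b d k'
          exact hz k' (by omega) (by omega) (by rw [← h2, ← ha1, ← ha]; exact ha0)
      · -- d = -1 : residue of 3 is 0, contradicting no-zero
        have hd1 : d = -1 := by omega
        exfalso
        apply hz 1 (by omega) (by omega)
        rw [h1eq]
        show PySem.Int.mod 3 d = 0
        rw [PySem.Int.mod_eq_zero_iff_dvd, hd1]
        exact ⟨-3, by ring⟩
    · exact absurd hd0 hd
    · rcases Nat.lt_or_ge 1 d.toNat with hp2 | hp2
      · -- d ≥ 2 : 1 is itself a residue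
        have h1R : (1:Int) ∈ pvR d := by
          unfold pvR
          rw [if_pos hdpos, Finset.mem_Icc]
          omega
        have hzR : PySem.Int.mod 3 d ∈ pvR d := mem_pvR_mod d 3 hd
        rw [h1eq] at hh
        simp only at hh
        obtain ⟨h1, h2, h3⟩ := pv_hash_inj d _ _ _ 1 1 (PySem.Int.mod 3 d) hd hbmem hcmem h1R hzR hh
        rw [h1eq]
        exact Prod.ext_iff.mpr ⟨h1, Prod.ext_iff.mpr ⟨h2, h3⟩⟩
      · -- d = 1 : residue of 3 is 0, contradicting no-zero
        have hd1 : d = 1 := by omega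
        exfalso
        apply hz 1 (by omega) (by omega)
        rw [h1eq]
        show PySem.Int.mod 3 d = 0
        rw [PySem.Int.mod_eq_zero_iff_dvd, hd1]
        exact ⟨3, by ring⟩
  · -- i ≥ 2 : all four relevant components are residues
    obtain ⟨i', rfl⟩ : ∃ i', i = i' + 1 := ⟨i - 1, by omega⟩
    have hbmem' : (pvSeq d (i'+1)).2.1 ∈ pvR d := by
      rw [pvSeq_b]; exact pvSeq_c_mem d hd i' (by omega)
    have hcmem' : (pvSeq d (i'+1)).2.2 ∈ pvR d := pvSeq_c_mem d hd (i'+1) (by omega)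
    obtain ⟨h1, h2, h3⟩ := pv_hash_inj d _ _ _ _ _ _ hd hbmem hcmem hbmem' hcmem' hh
    exact Prod.ext_iff.mpr ⟨h1, Prod.ext_iff.mpr ⟨h2, h3⟩⟩

-- hash-distinct visited states bound the iteration count
theorem pv_card_bound (d : Int) (hd : d ≠ 0) (k : Nat)
    (hdist : ∀ j j', 1 ≤ j → j ≤ k → 1 ≤ j' → j' ≤ k →
      pvHash d (pvSeq d j) = pvHash d (pvSeq d j') → j = j') :
    k ≤ d.natAbs ^ 3 + 2 := by
  by_contra hcon
  have hcon' : d.natAbs ^ 3 + 3 ≤ k := by omega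
  clear hcon
  have hmaps : ∀ j ∈ Finset.Icc 3 k, pvSeq d j ∈ (pvR d) ×ˢ ((pvR d) ×ˢ (pvR d)) := by
    intro j hj
    rw [Finset.mem_Icc] at hj
    exact pvSeq_mem_RT d hd j hj.1
  have hinj : Set.InjOn (pvSeq d) (Finset.Icc 3 k) := by
    intro j hj j' hj' heq
    simp only [Finset.coe_Icc, Set.mem_Icc] at hj hj'
    exact hdist j j' (by omega) (by omega) (by omega) (by omega) (congrArg (pvHash d) heq)
  have hle := Finset.card_le_card_of_injOn (pvSeq d) hmaps hinj
  rw [Nat.card_Icc, Finset.card_product, Finset.card_product, card_pvR d hd] at hle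
  have hpow : d.natAbs ^ 3 = d.natAbs * (d.natAbs * d.natAbs) := by ring
  omega

theorem pv_loopA_char (d : Int) (hd : d ≠ 0) : ∀ (f k : Nat) (visited : Std.HashSet Int),
    f + k = d.natAbs ^ 3 + 4 →
    (∀ h, visited.contains h = true ↔ ∃ j, 1 ≤ j ∧ j ≤ k ∧ h = pvHash d (pvSeq d j)) →
    (∀ j j', 1 ≤ j → j ≤ k → 1 ≤ j' → j' ≤ k →
      pvHash d (pvSeq d j) = pvHash d (pvSeq d j') → j = j') →
    (∀ j, 1 ≤ j → j ≤ k → (pvSeq d j).2.2 ≠ 0) →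
    (pvLoopA d f visited (pvSeq d k) = true ↔ pvZS d) := by
  intro f
  induction f with
  | zero =>
      intro k visited hfk hmem hdist hz
      exfalso
      have := pv_card_bound d hd k hdist
      omega
  | succ f ih =>
      intro k visited hfk hmem hdist hz
      have hstep : ((pvSeq d k).2.1, (pvSeq d k).2.2,
          PySem.Int.mod ((pvSeq d k).1 + (pvSeq d k).2.1 + (pvSeq d k).2.2) d) = pvSeq d (k+1) := rfl
      simp only [pvLoopA, hstep]
      split_ifs with h0 hdup
      · simp only [true_iff]
        exact ⟨k+1, by omega, h0⟩
      · -- hash already seen: a genuine state repeat, hence no zero ever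
        simp only [false_iff]
        obtain ⟨j, hj1, hjk, hjh⟩ := (hmem _).1 hdup
        have hz1 : ∀ j', 1 ≤ j' → j' ≤ k + 1 → (pvSeq d j').2.2 ≠ 0 := by
          intro j' hj'1 hj'2
          rcases Nat.lt_or_ge j' (k+1) with hlt | hge
          · exact hz j' hj'1 (by omega)
          · have : j' = k + 1 := by omega
            rw [this]; exact h0
        have heq : pvSeq d (k+1) = pvSeq d j := pv_dup_eq d k j hd hj1 hjk hz1 hjh
        have hper : pvSeq d j = pvSeq d (j + (k + 1 - j)) := by
          rw [heq.symm]; congr 1; omega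
        exact pv_no_zero d j (k + 1 - j) hper (by omega) (by omega)
          (by intro j' h1 h2; exact hz1 j' h1 (by omega))
      · -- new state: recurse with the extended set
        apply ih (k+1)
        · omega
        · intro h'
          rw [Std.HashSet.contains_insert]
          simp only [Bool.or_eq_true, beq_iff_eq]
          constructor
          · rintro (hrfl | hin)
            · exact ⟨k+1, by omega, by omega, hrfl.symm⟩
            · obtain ⟨j, hj1, hjk, hjh⟩ := (hmem h').1 hin
              exact ⟨j, hj1, by omega, hjh⟩
          · rintro ⟨j, hj1, hjk, hjh⟩
            rcases Nat.lt_or_ge j (k+1) with hlt | hge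
            · exact Or.inr ((hmem h').2 ⟨j, hj1, by omega, hjh⟩)
            · have : j = k + 1 := by omega
              subst this
              exact Or.inl hjh.symm
        · intro j j' hj1 hjk hj'1 hj'k hhash
          rcases Nat.lt_or_ge j (k+1) with hlt | hge <;>
            rcases Nat.lt_or_ge j' (k+1) with hlt' | hge'
          · exact hdist j j' hj1 (by omega) hj'1 (by omega) hhash
          · exfalso
            have : j' = k + 1 := by omega
            subst this
            exact hdup ((hmem _).2 ⟨j, hj1, by omega, hhash.symm⟩)
          · exfalso
            have : j = k + 1 := by omega
            subst this
            exact hdup ((hmem _).2 ⟨j', hj'1, by omega, hhash⟩)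
          · omega
        · intro j hj1 hjk
          rcases Nat.lt_or_ge j (k+1) with hlt | hge
          · exact hz j hj1 (by omega)
          · have : j = k + 1 := by omega
            rw [this]; exact h0

theorem pv_altScan_char (d : Int) (m : Nat) (hm1 : 1 ≤ m)
    (hmb : m ≤ d.natAbs ^ 3 + 3) (hmeet : pvSeq d m = pvSeq d (2*m)) :
    ∀ (f jj : Nat), 1 ≤ jj → f + jj = d.natAbs ^ 3 + 5 →
    (∀ j', 1 ≤ j' → j' < jj → pvSeq d (m + j') ≠ pvSeq d m) →
    (∀ j, 1 ≤ j → j < m + jj → (pvSeq d j).2.2 ≠ 0) →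
    (altScan d f (pvSeq d (m + jj)) (pvSeq d m) = true ↔ pvZS d) := by
  intro f
  induction f with
  | zero =>
      intro jj hjj1 hfj hnomeet hzfree
      exfalso
      apply hnomeet m hm1 (by omega)
      have hmm : m + m = 2 * m := by omega
      rw [hmm]
      exact hmeet.symm
  | succ f ih =>
      intro jj hjj1 hfj hnomeet hzfree
      have hstep : altStep d (pvSeq d (m + jj)) = pvSeq d (m + (jj + 1)) := by
        show altStep d (pvSeq d (m + jj)) = pvSeq d ((m + jj) + 1)
        rfl
      simp only [altScan, hstep]
      split_ifs with hstop h0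
      · -- closed the lap without a zero: no zero exists at all
        simp only [false_iff]
        have hper : pvSeq d m = pvSeq d (m + jj) := hstop.symm
        exact pv_no_zero d m jj hper hjj1 hm1 hzfree
      · simp only [true_iff]
        exact ⟨m + jj, by omega, h0⟩
      · apply ih (jj + 1) (by omega) (by omega)
        · intro j' hj'1 hj'2
          rcases Nat.lt_or_ge j' jj with hlt | hge
          · exact hnomeet j' hj'1 hlt
          · have : j' = jj := by omega
            rw [this]; exact hstop
        · intro j hj1 hj2
          rcases Nat.lt_or_ge j (m + jj) with hlt | hge
          · exact hzfree j hj1 hlt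
          · have : j = m + jj := by omega
            rw [this]; exact h0

theorem pv_altMeet_char (d : Int) : ∀ (f k : Nat),
    f + k = d.natAbs ^ 3 + 4 →
    (∃ i, k < i ∧ i ≤ d.natAbs ^ 3 + 3 ∧ pvSeq d i = pvSeq d (2*i)) →
    (∀ j, 1 ≤ j → j ≤ k → (pvSeq d j).2.2 ≠ 0) →
    (altMeet d f (pvSeq d k) (pvSeq d (2*k)) = true ↔ pvZS d) := by
  intro f
  induction f with
  | zero =>
      intro k hfk hex hz
      exfalso
      obtain ⟨i, hki, hib, _⟩ := hex
      omega
  | succ f ih =>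
      intro k hfk hex hz
      have e1 : altStep d (pvSeq d k) = pvSeq d (k+1) := rfl
      have e2 : altStep d (altStep d (pvSeq d (2*k))) = pvSeq d (2*(k+1)) := by
        have h21 : 2*(k+1) = (2*k + 1) + 1 := by omega
        rw [h21]
        rfl
      simp only [altMeet, e1, e2]
      split_ifs with h0 hmeet
      · simp only [true_iff]
        exact ⟨k+1, by omega, h0⟩
      · -- the pointers met: scan one lap from the meeting state
        have hk1b : k + 1 ≤ d.natAbs ^ 3 + 3 := by
          obtain ⟨i, hki, hib, _⟩ := hex
          omega
        have hscan := pv_altScan_char d (k+1) (by omega) hk1b hmeet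
          (d.natAbs ^ 3 + 4) 1 (by omega) (by omega)
          (by intro j' hj'1 hj'2; omega)
          (by
            intro j hj1 hj2
            rcases Nat.lt_or_ge j (k+1) with hlt | hge
            · exact hz j hj1 (by omega)
            · have : j = k + 1 := by omega
              rw [this]; exact h0)
        have e3 : altStep d (pvSeq d (k+1)) = pvSeq d ((k+1) + 1) := rfl
        rw [e3]
        exact hscan
      · apply ih (k+1) (by omega)
        · obtain ⟨i, hki, hib, hieq⟩ := hex
          refine ⟨i, ?_, hib, hieq⟩
          rcases Nat.lt_or_ge (k+1) i with hlt | hge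
          · exact hlt
          · exfalso
            have : i = k + 1 := by omega
            subst this
            exact hmeet hieq
        · intro j hj1 hjk
          rcases Nat.lt_or_ge j (k+1) with hlt | hge
          · exact hz j hj1 (by omega)
          · have : j = k + 1 := by omega
            rw [this]; exact h0

theorem pv_A_iff (d : Int) (hd : d ≠ 0) : has_divisor d = true ↔ pvZS d := by
  unfold has_divisor
  have hinit : pvLoopA d (d.natAbs ^ 3 + 4) (∅ : Std.HashSet Int) (1, 1, 1)
      = pvLoopA d (d.natAbs ^ 3 + 4) (∅ : Std.HashSet Int) (pvSeq d 0) := rfl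
  rw [hinit]
  apply pv_loopA_char d hd (d.natAbs ^ 3 + 4) 0 (∅ : Std.HashSet Int) (by omega)
  · intro h
    constructor
    · intro hc
      exfalso
      rw [Std.HashSet.contains_empty] at hc
      exact Bool.false_ne_true hc
    · rintro ⟨j, hj1, hj0, _⟩
      omega
  · intro j j' hj1 hjk _ _ _
    omega
  · intro j hj1 hjk
    omega

theorem pv_B_iff (d : Int) (hd : d ≠ 0) : has_divisor_alt d = true ↔ pvZS d := by
  unfold has_divisor_alt
  have hinit : altMeet d (d.natAbs ^ 3 + 4) (1, 1, 1) (1, 1, 1)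
      = altMeet d (d.natAbs ^ 3 + 4) (pvSeq d 0) (pvSeq d (2*0)) := rfl
  rw [hinit]
  apply pv_altMeet_char d (d.natAbs ^ 3 + 4) 0 (by omega)
  · obtain ⟨m, hm1, hmb, hmeq⟩ := pv_meet_exists d hd
    exact ⟨m, by omega, hmb, hmeq⟩
  · intro j hj1 hjk
    omega

-- ===== VERDICT (by name: the statement is the Claim_ definition above) =====
theorem has_divisor_spec : Claim_equal_has_divisor := by
  intro d _ hd
  unfold Spec_has_divisor
  have hA := pv_A_iff d hd
  have hB := pv_B_iff d hd
  cases ha : has_divisor d <;> cases hb : has_divisor_alt d <;> simp_all
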